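-- pv_equiv track=rewrite | github.com/Tomasz-Kluczkowski/Coding_exercises | Madvah-Array/madvah_array.py | is_madvah_array
-- ===== SOURCE A (Python) =====
-- def is_madvah_array(array):
--     """Check if array matches condition required for a Madvah Array.
--
--     The Madvah Array has the following property:
--     a[0] = a[1] + a[2] = a[3] + a[4] + a[5] = a[6] + a[7] + a[8] + a[9] = ...
--
--     Parameters
--     ----------
--     array : list(int)
--         List of integers.
--
--     Returns
--     -------
--     Bool
--         True if array is Madvah type, false otherwise.
--     """
--     if len(array) < 3:
--         return False
--     root_value = array[0]
--     ix_bot = 1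
--     ix_top = 2
--     items_to_count = 2
--     while ix_top < len(array):
--         sum = 0
--         for ix in range(ix_bot, ix_top + 1):
--             sum += array[ix]
--         if sum != root_value:
--             return False
--         # If at the end of the array and all the sums were equal
--         # to the root value.
--         elif ix_top == len(array) - 1:
--             return True
--
--         items_to_count += 1
--         ix_bot = ix_top + 1
--         ix_top = ix_top + items_to_count
--         if ix_bot > len(array) - 1:
--             return False
--     return False
-- ===== SOURCE B (Python) =====
-- def is_madvah_array(array):
--     if len(array) < 3:
--         return False
--     target = array[0]
--     size = 2
--     acc = 0
--     cnt = 0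
--     for x in array[1:]:
--         acc += x
--         cnt += 1
--         if cnt == size:
--             if acc != target:
--                 return False
--             acc = 0
--             cnt = 0
--             size += 1
--     return cnt == 0
-- ===== Notes on version B (the rewrite author's own statement) =====
-- stated objective: simpler
-- what changed: Replaces A's while loop over group index boundaries (ix_bot/ix_top/items_to_count) with a nested summation loop by a single element-wise scan over array[1:] keeping a running group sum and counter, resetting at each completed group.
import Mathlib
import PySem

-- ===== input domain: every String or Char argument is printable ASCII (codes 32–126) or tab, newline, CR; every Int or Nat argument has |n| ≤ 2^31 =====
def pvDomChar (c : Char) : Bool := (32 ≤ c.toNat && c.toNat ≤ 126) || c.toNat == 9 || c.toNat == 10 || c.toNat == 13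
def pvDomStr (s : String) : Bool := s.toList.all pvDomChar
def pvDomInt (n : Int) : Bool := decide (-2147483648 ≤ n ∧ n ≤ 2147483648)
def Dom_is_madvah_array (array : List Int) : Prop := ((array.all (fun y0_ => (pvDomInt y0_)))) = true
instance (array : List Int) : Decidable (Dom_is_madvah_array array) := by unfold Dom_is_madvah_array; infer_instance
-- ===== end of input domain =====

-- B replaces A's group-boundary index arithmetic and nested summation loop by one
-- element-wise scan with a running group sum and counter (objective: simpler).

-- ===== PORT A =====
-- A's while loop; state (ix_bot, ix_top, items_to_count) kept as Nat (in Python these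
-- are always nonnegative ints).  array[ix] is ported as getD ix 0: every index A reads
-- satisfies ix ≤ ix_top < len(array), so the access is exact.
def isMadvahLoopA (array : List Int) (root : Int) (ix_bot ix_top items : Nat) : Bool :=
  if _h : ix_top < array.length then
    let sum := (List.range' ix_bot (ix_top + 1 - ix_bot)).foldl
                 (fun s ix => s + array.getD ix 0) 0
    if sum ≠ root then false
    else if ix_top = array.length - 1 then true
    else
      let items' := items + 1
      let ix_bot' := ix_top + 1
      let ix_top' := ix_top + items'
      if ix_bot' > array.length - 1 then false
      else isMadvahLoopA array root ix_bot' ix_top' items'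
  else false
termination_by array.length - ix_top
decreasing_by omega

def is_madvah_array (array : List Int) : Bool :=
  if array.length < 3 then false
  else isMadvahLoopA array (array.getD 0 0) 1 2 2

-- ===== PORT B =====
-- B's for-loop over array[1:] with early return.
def isMadvahLoopB (target : Int) (size : Nat) (acc : Int) (cnt : Nat) : List Int → Bool
  | [] => cnt == 0
  | x :: rest =>
    let acc' := acc + x
    let cnt' := cnt + 1
    if cnt' = size then
      if acc' ≠ target then false
      else isMadvahLoopB target (size + 1) 0 0 rest
    else isMadvahLoopB target size acc' cnt' rest

def is_madvah_array_alt (array : List Int) : Bool :=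
  if array.length < 3 then false
  else isMadvahLoopB (array.getD 0 0) 2 0 0 (array.drop 1)

-- ===== PRECONDITION & SPEC =====
def Spec_is_madvah_array (array : List Int) (out : Bool) : Prop := out = is_madvah_array_alt array
instance (array : List Int) (out : Bool) : Decidable (Spec_is_madvah_array array out) := by unfold Spec_is_madvah_array; infer_instance

-- ===== CLAIM (what is proved, stated in full; the proofs are below) =====
def Claim_equal_is_madvah_array : Prop := ∀ (array : List Int), Dom_is_madvah_array array → Spec_is_madvah_array array (is_madvah_array array)

-- ===== LEMMAS AND PROOFS =====

-- A's inner summation loop computes the sum of the group of k elements starting at i.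
lemma foldl_range'_sum (array : List Int) :
    ∀ (k i : Nat) (s : Int), i + k ≤ array.length →
      (List.range' i k).foldl (fun acc ix => acc + array.getD ix 0) s
        = s + ((array.drop i).take k).sum := by
  intro k
  induction k with
  | zero => intro i s _; simp
  | succ k ih =>
    intro i s h
    have hi : i < array.length := by omega
    rw [List.range'_succ, List.foldl_cons, ih (i+1) _ (by omega)]
    have hdrop : array[i] :: array.drop (i+1) = array.drop i :=
      List.getElem_cons_drop hi
    simp only [List.getD, List.getElem?_eq_getElem hi, Option.getD_some]
    rw [← hdrop, List.take_succ_cons, List.sum_cons]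
    ring

-- B's scan, started mid-group with running sum acc and cnt < size elements consumed,
-- completes the current group of size elements (or fails on a short tail).
lemma loopB_group (target : Int) :
    ∀ (l : List Int) (size cnt : Nat) (acc : Int), cnt < size →
      isMadvahLoopB target size acc cnt l =
        if l.length + cnt < size then decide (l.length + cnt = 0)
        else if acc + (l.take (size - cnt)).sum = target then
          isMadvahLoopB target (size + 1) 0 0 (l.drop (size - cnt))
        else false := by
  intro l
  induction l with
  | nil =>
    intro size cnt acc hlt
    rw [isMadvahLoopB]
    simp only [List.length_nil, Nat.zero_add]
    rw [if_pos hlt]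
    cases cnt <;> simp
  | cons x rest ih =>
    intro size cnt acc hlt
    by_cases hfull : cnt + 1 = size
    · have hsz : size - cnt = 1 := by omega
      have hge : ¬ ((x :: rest).length + cnt < size) := by simp; omega
      simp only [isMadvahLoopB]
      rw [if_pos hfull, if_neg hge, hsz]
      simp only [List.take_succ_cons, List.take_zero, List.drop_succ_cons,
        List.drop_zero, List.sum_cons, List.sum_nil, add_zero]
      by_cases h : acc + x = target <;> simp [h]
    · have hlt' : cnt + 1 < size := by omega
      rw [isMadvahLoopB]
      simp only [if_neg hfull]
      rw [ih size (cnt + 1) (acc + x) hlt']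
      have hsz : size - cnt = (size - (cnt + 1)) + 1 := by omega
      by_cases hshort : rest.length + (cnt + 1) < size
      · have hshort' : (x :: rest).length + cnt < size := by simp; omega
        rw [if_pos hshort, if_pos hshort']
        simp
      · have hshort' : ¬ ((x :: rest).length + cnt < size) := by simp; omega
        rw [if_neg hshort, if_neg hshort']
        rw [hsz]
        simp only [List.take_succ_cons, List.drop_succ_cons, List.sum_cons]
        rw [add_assoc]

-- Main correspondence: A's loop entered at a group boundary ix_bot with group size
-- `size` equals B's scan on the remaining tail of the array.
lemma loopA_eq_loopB (array : List Int) (root : Int) :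
    ∀ (n ix_bot size : Nat), n = array.length - ix_bot →
      1 ≤ size → 1 ≤ ix_bot → ix_bot < array.length →
      isMadvahLoopA array root ix_bot (ix_bot + size - 1) size
        = isMadvahLoopB root size 0 0 (array.drop ix_bot) := by
  intro n
  induction n using Nat.strong_induction_on with
  | _ n ih =>
    intro ix_bot size hn hsize hbot hlen
    have hrem : (array.drop ix_bot).length = array.length - ix_bot := by simp
    rw [loopB_group root _ size 0 0 (by omega)]
    by_cases htop : ix_bot + size - 1 < array.length
    · -- whole group present in the array
      rw [isMadvahLoopA, dif_pos htop]
      have hk : ix_bot + size - 1 + 1 - ix_bot = size := by omega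
      rw [hk, foldl_range'_sum array size ix_bot 0 (by omega), zero_add]
      have hnotshort : ¬ ((array.drop ix_bot).length + 0 < size) := by
        rw [hrem]; omega
      rw [if_neg hnotshort]
      have htake : (array.drop ix_bot).take (size - 0) = (array.drop ix_bot).take size := by
        simp
      rw [htake, zero_add]
      by_cases hsum : ((array.drop ix_bot).take size).sum = root
      · rw [if_neg (by simp [hsum]), if_pos hsum]
        by_cases hendp : ix_bot + size - 1 = array.length - 1
        · -- last group ends exactly at the end of the array
          rw [if_pos hendp]
          have hdl : (array.drop ix_bot).drop (size - 0) = [] := by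
            simp; omega
          rw [hdl, isMadvahLoopB]
          simp
        · rw [if_neg hendp]
          have hbot' : ¬ (ix_bot + size - 1 + 1 > array.length - 1) := by omega
          rw [if_neg hbot']
          have harith : ix_bot + size - 1 + 1 = ix_bot + size := by omega
          have harith2 : ix_bot + size - 1 + (size + 1) = ix_bot + size + (size + 1) - 1 := by
            omega
          rw [harith, harith2]
          rw [ih (array.length - (ix_bot + size)) (by omega) (ix_bot + size) (size + 1)
            rfl (by omega) (by omega) (by omega)]
          have hdd : (array.drop ix_bot).drop (size - 0) = array.drop (ix_bot + size) := by
            rw [Nat.sub_zero, List.drop_drop]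
            try congr 1
            try omega
          rw [hdd]
      · simp [hsum]

    · -- partial trailing group: both sides reject
      rw [isMadvahLoopA, dif_neg htop]
      have hshort : (array.drop ix_bot).length + 0 < size := by rw [hrem]; omega
      rw [if_pos hshort]
      simp
      omega

-- ===== VERDICT (by name: the statement is the Claim_ definition above) =====
theorem is_madvah_array_spec : Claim_equal_is_madvah_array := by
  intro array _
  unfold Spec_is_madvah_array is_madvah_array is_madvah_array_alt
  by_cases h : array.length < 3
  · rw [if_pos h, if_pos h]
  · rw [if_neg h, if_neg h]
    have : (2 : Nat) = 1 + 2 - 1 := rfl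
    rw [this]
    exact loopA_eq_loopB array (array.getD 0 0) (array.length - 1) 1 2 rfl
      (by omega) (by omega) (by omega)
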